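-- pv_equiv track=rewrite | github.com/Algorithm-Coding-Test-Data-Analysis/algoview | data/py/lv1/LV1_0000_프로그래머스_x만큼 간격이 있는 n개의 숫자_구현_성철.py | solution
-- ===== SOURCE A (Python) =====
-- def solution(x, n):
--     if x == 0:
--         return [0 for _ in range(n)]
--     elif x >= 1:
--         answer = [val for val in range(x, x * n + 1, x)]
--     else:
--         answer = [val for val in range(x, x * n - 1, x)]
--     return answer
-- ===== SOURCE B (Python) =====
-- def solution(x, n):
--     return [x * (i + 1) for i in range(n)]
-- ===== Notes on version B (the rewrite author's own statement) =====
-- stated objective: simpler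
-- what changed: Replaces the three sign-based branches over a stepped range keyed to x with a single comprehension over range(n) that computes each term as x*(i+1) from its index.
import Mathlib
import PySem

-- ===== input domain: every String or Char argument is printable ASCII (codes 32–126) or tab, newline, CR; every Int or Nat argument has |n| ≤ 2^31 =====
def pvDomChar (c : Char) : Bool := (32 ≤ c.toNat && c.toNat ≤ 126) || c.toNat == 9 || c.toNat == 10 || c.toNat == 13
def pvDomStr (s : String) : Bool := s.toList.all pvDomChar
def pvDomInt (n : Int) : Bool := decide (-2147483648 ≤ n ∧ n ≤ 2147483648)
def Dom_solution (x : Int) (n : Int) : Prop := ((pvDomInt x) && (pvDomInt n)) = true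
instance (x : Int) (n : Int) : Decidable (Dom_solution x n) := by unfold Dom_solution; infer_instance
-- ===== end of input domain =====

-- B replaces A's three sign-based branches with one index-based comprehension (objective: simpler).

-- ===== PORT A =====
def solution (x : Int) (n : Int) : List Int :=
  if x = 0 then
    (PySem.List.pyRange 0 n 1).map (fun _ => (0 : Int))
  else if 1 ≤ x then
    (PySem.List.pyRange x (x * n + 1) x).map (fun val => val)
  else
    (PySem.List.pyRange x (x * n - 1) x).map (fun val => val)

-- ===== PORT B =====
def solution_alt (x : Int) (n : Int) : List Int :=
  (PySem.List.pyRange 0 n 1).map (fun i => x * (i + 1))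

-- ===== PRECONDITION & SPEC =====
def Spec_solution (x : Int) (n : Int) (out : List Int) : Prop := out = solution_alt x n
instance (x : Int) (n : Int) (out : List Int) : Decidable (Spec_solution x n out) := by unfold Spec_solution; infer_instance

-- ===== CLAIM (what is proved, stated in full; the proofs are below) =====
def Claim_equal_solution : Prop := ∀ (x : Int) (n : Int), Dom_solution x n → Spec_solution x n (solution x n)

-- ===== LEMMAS AND PROOFS =====

lemma solution_alt_eq (x n : Int) :
    solution_alt x n = (List.range n.toNat).map (fun k : Nat => x + x * (k : Int)) := by
  unfold solution_alt
  rw [PySem.List.pyRange_one, List.map_map]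
  have h0 : n - 0 = n := by ring
  rw [h0]
  refine List.map_congr_left (fun k _ => ?_)
  show x * ((0 + (k : Int)) + 1) = x + x * (k : Int)
  ring

-- ===== VERDICT (by name: the statement is the Claim_ definition above) =====
theorem solution_spec : Claim_equal_solution := by
  intro x n _
  unfold Spec_solution solution
  rw [solution_alt_eq]
  by_cases hx : x = 0
  · subst hx
    rw [PySem.List.pyRange_one, List.map_map]
    simp [Function.comp_def]
  · rcases lt_or_gt_of_ne hx with hneg | hpos
    · -- x < 0: else-branch, step x negative
      have h1 : ¬ (1 ≤ x) := by omega
      simp only [if_neg hx, if_neg h1, List.map_id']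
      show PySem.List.pyRange x (x * n - 1) x = _
      unfold PySem.List.pyRange
      rw [if_neg hx]
      have hcnt : (if x * n - 1 < x then ((x - (x * n - 1) + -x - 1) / -x).toNat else 0)
          = n.toNat := by
        by_cases hn : 0 < n
        · have hlt : x * n - 1 < x := by nlinarith
          rw [if_pos hlt]
          have : x - (x * n - 1) + -x - 1 = (-x) * n := by ring
          rw [this, Int.mul_ediv_cancel_left _ (by omega : (-x) ≠ 0)]
        · have hge : ¬ (x * n - 1 < x) := by nlinarith
          rw [if_neg hge]
          omega
      simp only [if_neg (by omega : ¬ (0 < x)), hcnt]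
    · -- x > 0: elif-branch
      have h1 : 1 ≤ x := hpos
      simp only [if_neg hx, if_pos h1, List.map_id']
      rw [PySem.List.pyRange_of_pos _ _ hpos]
      have hcnt : (if x < x * n + 1 then ((x * n + 1 - x + x - 1) / x).toNat else 0)
          = n.toNat := by
        by_cases hn : 0 < n
        · have hlt : x < x * n + 1 := by nlinarith
          rw [if_pos hlt]
          have : x * n + 1 - x + x - 1 = x * n := by ring
          rw [this, Int.mul_ediv_cancel_left _ hx]
        · have hge : ¬ (x < x * n + 1) := by nlinarith
          rw [if_neg hge]
          omega
      rw [hcnt]
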